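-- pv_equiv track=rewrite | github.com/jheidel/algemy-solver | board.py | to_board_sightlines
-- ===== SOURCE A (Python) =====
-- def to_board_sightlines(point_lists):
--   for l in point_lists:
--     acc = []
--     for el in l:
--       if el:
--         acc.append(el)
--       else:
--         if len(acc) > 1:
--           yield list(acc)
--         acc[:] = []
--     if len(acc) > 1:
--       yield list(acc)
-- ===== SOURCE B (Python) =====
-- def to_board_sightlines(point_lists):
--   for l in point_lists:
--     n = len(l)
--     i = 0
--     while i < n:
--       if l[i]:
--         j = i + 1
--         while j < n and l[j]:
--           j += 1
--         if j - i > 1: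
--           yield l[i:j]
--         i = j
--       else:
--         i += 1
-- ===== Notes on version B (the rewrite author's own statement) =====
-- stated objective: alternative
-- what changed: Replaces the accumulator-and-flush scan with a two-pointer index scan: on a truthy element, advance a second index past the whole run and yield the slice l[i:j] if it is longer than one, so no acc list is built or cleared.
import Mathlib
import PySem

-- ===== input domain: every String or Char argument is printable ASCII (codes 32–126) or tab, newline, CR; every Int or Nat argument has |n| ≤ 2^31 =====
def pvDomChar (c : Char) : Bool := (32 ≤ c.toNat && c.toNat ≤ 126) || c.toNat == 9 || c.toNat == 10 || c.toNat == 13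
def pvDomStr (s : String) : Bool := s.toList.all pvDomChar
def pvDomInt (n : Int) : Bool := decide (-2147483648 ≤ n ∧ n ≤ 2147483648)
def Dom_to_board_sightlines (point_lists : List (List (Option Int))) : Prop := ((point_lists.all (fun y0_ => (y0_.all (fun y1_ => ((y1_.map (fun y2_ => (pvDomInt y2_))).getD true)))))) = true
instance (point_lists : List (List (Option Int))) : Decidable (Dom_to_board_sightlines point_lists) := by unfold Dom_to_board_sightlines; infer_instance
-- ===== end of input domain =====

-- B replaces A's accumulator-and-flush scan by a two-pointer index scan that yields slices;
-- same cost, the generators' yield sequences (returned here as lists) are proved equal.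

-- Python truthiness of an Optional[int] cell: None and 0 are falsy.
def pyTruthy (o : Option Int) : Bool :=
  match o with
  | none => false
  | some n => n != 0

-- ===== PORT A =====
-- inner 'for el in l' loop of A, state (acc, out) where out collects the yields
def innerLoopA : List (Option Int) → List (Option Int) → List (List (Option Int)) →
    List (Option Int) × List (List (Option Int))
  | [], acc, out => (acc, out)
  | el :: rest, acc, out =>
      if pyTruthy el then innerLoopA rest (acc ++ [el]) out
      else innerLoopA rest [] (if acc.length > 1 then out ++ [acc] else out)

-- outer 'for l in point_lists' loop of A (with the trailing flush after each inner loop)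
def outerLoopA : List (List (Option Int)) → List (List (Option Int)) → List (List (Option Int))
  | [], out => out
  | l :: rest, out =>
      let p := innerLoopA l [] out
      outerLoopA rest (if p.1.length > 1 then p.2 ++ [p.1] else p.2)

def to_board_sightlines (point_lists : List (List (Option Int))) : List (List (Option Int)) :=
  outerLoopA point_lists []

-- ===== PORT B =====
-- B's inner 'while j < n and l[j]: j += 1'
def scanRunB (l : List (Option Int)) (j : Nat) : Nat :=
  if h : j < l.length ∧ pyTruthy (PySem.List.pyGetD l (j : Int) none) then scanRunB l (j + 1)
  else j
termination_by l.length - j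
decreasing_by omega

-- cited by loopB's termination proof (the scan only moves j forward)
theorem scanRunB_ge (l : List (Option Int)) (j : Nat) : j ≤ scanRunB l j := by
  fun_induction scanRunB with
  | case1 j h ih => omega
  | case2 j h => omega

-- B's outer 'while i < n' loop over one line l, yields collected in order
def loopB (l : List (Option Int)) (i : Nat) : List (List (Option Int)) :=
  if h : i < l.length then
    if pyTruthy (PySem.List.pyGetD l (i : Int) none) then
      let j := scanRunB l (i + 1)
      (if j - i > 1 then [PySem.List.slice l (some (i : Int)) (some (j : Int))] else []) ++
        loopB l j
    else loopB l (i + 1)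
  else []
termination_by l.length - i
decreasing_by
  · have := scanRunB_ge l (i + 1); omega
  · omega

-- B's 'for l in point_lists' with yields
def to_board_sightlines_alt (point_lists : List (List (Option Int))) : List (List (Option Int)) :=
  match point_lists with
  | [] => []
  | l :: rest => loopB l 0 ++ to_board_sightlines_alt rest

-- ===== PRECONDITION & SPEC =====
def Spec_to_board_sightlines (point_lists : List (List (Option Int))) (out : List (List (Option Int))) : Prop := out = to_board_sightlines_alt point_lists
instance (point_lists : List (List (Option Int))) (out : List (List (Option Int))) : Decidable (Spec_to_board_sightlines point_lists out) := by unfold Spec_to_board_sightlines; infer_instance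

-- ===== CLAIM (what is proved, stated in full; the proofs are below) =====
def Claim_equal_to_board_sightlines : Prop := ∀ (point_lists : List (List (Option Int))), Dom_to_board_sightlines point_lists → Spec_to_board_sightlines point_lists (to_board_sightlines point_lists)

-- ===== LEMMAS AND PROOFS =====

-- the yields A's inner loop produces for the rest of a line, starting from accumulator acc
def finishA (m acc : List (Option Int)) : List (List (Option Int)) :=
  let p := innerLoopA m acc []
  if p.1.length > 1 then p.2 ++ [p.1] else p.2

theorem innerLoopA_out (m : List (Option Int)) :
    ∀ acc out, innerLoopA m acc out =
      ((innerLoopA m acc []).1, out ++ (innerLoopA m acc []).2) := by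
  induction m with
  | nil => intro acc out; simp [innerLoopA]
  | cons el rest ih =>
      intro acc out
      by_cases h : pyTruthy el = true
      · simp only [innerLoopA, h, if_true]
        exact ih _ _
      · simp only [innerLoopA, h, if_neg, Bool.not_eq_true]
        rw [ih [] (if acc.length > 1 then out ++ [acc] else out),
            ih [] (if acc.length > 1 then [] ++ [acc] else [])]
        split <;> simp

theorem finishA_nil (acc : List (Option Int)) :
    finishA [] acc = if acc.length > 1 then [acc] else [] := by
  simp only [finishA, innerLoopA]
  split <;> rfl

theorem finishA_truthy {el : Option Int} (h : pyTruthy el = true)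
    (m acc : List (Option Int)) : finishA (el :: m) acc = finishA m (acc ++ [el]) := by
  simp [finishA, innerLoopA, h]

theorem finishA_falsy {el : Option Int} (h : ¬ pyTruthy el = true)
    (m acc : List (Option Int)) :
    finishA (el :: m) acc = (if acc.length > 1 then [acc] else []) ++ finishA m [] := by
  simp only [finishA, innerLoopA, h, if_neg, Bool.not_eq_true]
  rw [innerLoopA_out m [] (if acc.length > 1 then [] ++ [acc] else [])]
  split <;> split <;> simp_all

theorem finishA_run (run : List (Option Int)) :
    ∀ acc rest, run.all pyTruthy = true →
      finishA (run ++ rest) acc = finishA rest (acc ++ run) := by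
  induction run with
  | nil => intro acc rest _; simp
  | cons el r ih =>
      intro acc rest hall
      simp only [List.all_cons, Bool.and_eq_true] at hall
      rw [List.cons_append, finishA_truthy hall.1, ih _ _ hall.2, List.append_assoc]
      rfl

-- what the scan guarantees about its result
theorem scanRunB_spec (l : List (Option Int)) (j0 : Nat) (h0 : j0 ≤ l.length) :
    scanRunB l j0 ≤ l.length ∧
    (∀ k, j0 ≤ k → k < scanRunB l j0 → pyTruthy (l.getD k none) = true) ∧
    (scanRunB l j0 < l.length → ¬ pyTruthy (l.getD (scanRunB l j0) none) = true) := by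
  fun_induction scanRunB with
  | case1 j h ih =>
      have hj : j < l.length := h.1
      have ht : pyTruthy (l.getD j none) = true := by
        have := h.2; simpa using this
      obtain ⟨h1, h2, h3⟩ := ih (by omega)
      refine ⟨h1, ?_, h3⟩
      intro k hk1 hk2
      rcases Nat.eq_or_lt_of_le hk1 with rfl | hlt
      · exact ht
      · exact h2 k hlt hk2
  | case2 j h =>
      refine ⟨h0, by omega, ?_⟩
      intro hlt
      rw [Decidable.not_and_iff_or_not] at h
      rcases h with h | h
      · omega
      · simpa using h

theorem loopB_eq_finishA (l : List (Option Int)) (i : Nat) :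
    loopB l i = finishA (l.drop i) [] := by
  fun_induction loopB with
  | case1 i hi ht j ih =>
      -- truthy head at i
      have hlen : i + 1 ≤ l.length := by omega
      have hj : j = scanRunB l (i + 1) := rfl
      clear_value j
      obtain ⟨hjle, hjall, hjstop⟩ := scanRunB_spec l (i + 1) hlen
      rw [← hj] at hjle hjall hjstop
      have hij : i + 1 ≤ j := by rw [hj]; exact scanRunB_ge l (i + 1)
      -- the run of truthy cells l[i:j]
      have hgi : l.getD i none = l[i] := List.getD_eq_getElem l none hi
      have hti : pyTruthy (l[i]) = true := by
        rw [← hgi]; simpa using ht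
      have hsplit : l.drop i = (l.drop i).take (j - i) ++ l.drop j := by
        have h1 : i + (j - i) = j := by omega
        conv_lhs => rw [← List.take_append_drop (j - i) (l.drop i)]
        rw [List.drop_drop, h1]
      have hrunlen : ((l.drop i).take (j - i)).length = j - i := by
        simp; omega
      have hrunall : ((l.drop i).take (j - i)).all pyTruthy = true := by
        rw [List.all_eq_true]
        intro x hx
        rw [List.mem_iff_getElem] at hx
        obtain ⟨t, htl, rfl⟩ := hx
        have ht' : t < j - i := by rw [hrunlen] at htl; exact htl
        have hit : i + t < l.length := by omega
        have : ((l.drop i).take (j - i))[t] = l[i + t] := by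
          rw [List.getElem_take, List.getElem_drop]
        rw [this]
        rcases Nat.eq_zero_or_pos t with rfl | htpos
        · simpa using hti
        · have := hjall (i + t) (by omega) (by omega)
          rwa [List.getD_eq_getElem l none hit] at this
      have hslice : PySem.List.slice l (some (i : Int)) (some (j : Int)) =
          (l.drop i).take (j - i) := PySem.List.slice_natCast l i j
      rw [hsplit, finishA_run _ [] _ hrunall, List.nil_append]
      by_cases hjl : j < l.length
      · -- line continues with a falsy cell at j
        have hdj : l.drop j = l[j] :: l.drop (j + 1) := List.drop_eq_getElem_cons hjl
        have hfj : ¬ pyTruthy (l[j]) = true := by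
          have := hjstop hjl
          rwa [List.getD_eq_getElem l none hjl] at this
        rw [hdj, finishA_falsy hfj, ih, hdj, finishA_falsy hfj]
        simp only [List.length_nil, hrunlen, hslice]
        split <;> simp
      · -- run reaches the end of the line
        have hje : j = l.length := by omega
        have hdj : l.drop j = [] := by rw [hje, List.drop_length]
        rw [hdj, finishA_nil, ih, hdj, finishA_nil]
        simp only [List.length_nil, hrunlen, hslice]
        split <;> simp
  | case2 i hi hf ih =>
      have hdi : l.drop i = l[i] :: l.drop (i + 1) := List.drop_eq_getElem_cons hi
      have hfi : ¬ pyTruthy (l[i]) = true := by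
        rw [← List.getD_eq_getElem l none hi]; simpa using hf
      rw [ih, hdi, finishA_falsy hfi]
      simp
  | case3 i hi =>
      have : l.drop i = [] := List.drop_eq_nil_of_le (by omega)
      rw [this, finishA_nil]
      simp

theorem outerLoopA_eq (pls : List (List (Option Int))) :
    ∀ out, outerLoopA pls out = out ++ to_board_sightlines_alt pls := by
  induction pls with
  | nil => intro out; simp [outerLoopA, to_board_sightlines_alt]
  | cons l rest ih =>
      intro out
      simp only [outerLoopA, to_board_sightlines_alt]
      rw [innerLoopA_out l [] out, ih]
      have hl : loopB l 0 = finishA l [] := by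
        rw [loopB_eq_finishA]; simp
      rw [hl]
      simp only [finishA]
      split <;> simp

-- ===== VERDICT (by name: the statement is the Claim_ definition above) =====
theorem to_board_sightlines_spec : Claim_equal_to_board_sightlines := by
  intro pls _
  unfold Spec_to_board_sightlines to_board_sightlines
  rw [outerLoopA_eq]
  simp
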